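-- pv_equiv track=rewrite | github.com/Revi1337/BaekJoon-Coding-Test | SWEA/D3/1289. 원재의 메모리 복구하기/원재의 메모리 복구하기.py | solution
-- ===== SOURCE A (Python) =====
-- def solution(seq, target):
--     answer = 0
--     length = len(target)
--     original = "0" * length
--     for idx in range(length):
--         if original[idx] != target[idx]:
--             if target[idx] == '1':
--                 original = original[:idx] + ('1' * (length - idx))
--             else:
--                 original = original[:idx] + ('0' * (length - idx))
--             answer += 1
--     return f'#{seq} {answer}'
-- ===== SOURCE B (Python) =====
-- def solution(seq, target):
--     answer = 0
--     prev = '0'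
--     for c in target:
--         if c != prev:
--             answer += 1
--             prev = '1' if c == '1' else '0'
--     return f'#{seq} {answer}'
-- ===== Notes on version B (the rewrite author's own statement) =====
-- stated objective: faster
-- what changed: B replaces A's quadratic loop that rebuilds the whole string on every flip with a single pass that only tracks the current fill character and counts mismatches.
import Mathlib
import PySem

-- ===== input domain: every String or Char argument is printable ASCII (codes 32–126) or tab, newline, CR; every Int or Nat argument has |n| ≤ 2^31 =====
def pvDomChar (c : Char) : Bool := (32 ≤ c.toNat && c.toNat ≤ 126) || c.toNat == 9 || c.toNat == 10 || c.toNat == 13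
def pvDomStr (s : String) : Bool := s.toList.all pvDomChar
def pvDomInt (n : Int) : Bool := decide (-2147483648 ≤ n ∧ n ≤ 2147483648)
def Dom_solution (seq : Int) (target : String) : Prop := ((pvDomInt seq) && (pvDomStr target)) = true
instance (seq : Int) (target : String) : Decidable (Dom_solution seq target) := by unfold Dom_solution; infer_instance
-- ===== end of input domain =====

-- B replaces A's quadratic string-rebuilding loop by a single pass tracking the current fill character (faster, asymptotic).


-- ===== PORT A =====
-- loop body of A: state (original, answer), one step for index idx
def solStepA (tl : List Char) (st : List Char × Int) (idx : Int) : List Char × Int :=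
  if PySem.List.pyGetD st.1 idx ' ' ≠ PySem.List.pyGetD tl idx ' ' then
    if PySem.List.pyGetD tl idx ' ' = '1' then
      (PySem.List.slice st.1 none (some idx) ++ List.replicate ((tl.length : Int) - idx).toNat '1', st.2 + 1)
    else
      (PySem.List.slice st.1 none (some idx) ++ List.replicate ((tl.length : Int) - idx).toNat '0', st.2 + 1)
  else st

def solution (seq : Int) (target : String) : String :=
  String.ofList (('#' :: (PySem.Int.toStr seq).toList) ++ (' ' :: (PySem.Int.toStr
    ((PySem.List.pyRange 0 (target.toList.length : Int) 1).foldl (solStepA target.toList)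
      (List.replicate target.toList.length '0', (0 : Int))).2).toList))

-- ===== PORT B =====
-- loop body of B: state (prev, answer), one step per character
def solStepB (st : Char × Int) (c : Char) : Char × Int :=
  if c ≠ st.1 then ((if c = '1' then '1' else '0'), st.2 + 1) else st

def solution_alt (seq : Int) (target : String) : String :=
  String.ofList (('#' :: (PySem.Int.toStr seq).toList) ++ (' ' :: (PySem.Int.toStr
    (target.toList.foldl solStepB ('0', (0 : Int))).2).toList))

-- ===== PRECONDITION & SPEC =====
def Spec_solution (seq : Int) (target : String) (out : String) : Prop := out = solution_alt seq target
instance (seq : Int) (target : String) (out : String) : Decidable (Spec_solution seq target out) := by unfold Spec_solution; infer_instance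

-- ===== CLAIM (what is proved, stated in full; the proofs are below) =====
def Claim_equal_solution : Prop := ∀ (seq : Int) (target : String), Dom_solution seq target → Spec_solution seq target (solution seq target)

-- ===== LEMMAS AND PROOFS =====

-- Invariant: with tl processed up to index |pre|, A's original is pre ++ replicate |rest| fill;
-- the remaining fold returns the same answer component as B's fold over rest.
theorem loop_invariant (tl : List Char) : ∀ (rest pre : List Char) (fill : Char) (ans : Int),
    tl.drop pre.length = rest → pre.length + rest.length = tl.length →
    ((PySem.List.pyRange (pre.length : Int) (tl.length : Int) 1).foldl (solStepA tl)
      (pre ++ List.replicate rest.length fill, ans)).2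
    = (rest.foldl solStepB (fill, ans)).2 := by
  intro rest
  induction rest with
  | nil =>
      intro pre fill ans _ hlen
      rw [PySem.List.pyRange_one_eq_nil (by simp at hlen; omega)]
      simp
  | cons c rest ih =>
      intro pre fill ans hdrop hlen
      have hlen' : pre.length + (rest.length + 1) = tl.length := by simpa using hlen
      have hk : pre.length < tl.length := by omega
      rw [PySem.List.pyRange_one_cons (by exact_mod_cast hk)]
      simp only [List.foldl_cons]
      have hc : tl[pre.length]'hk = c := by
        have h0 : (tl.drop pre.length)[0]'(by simp [hdrop]) = c := by simp [hdrop]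
        simpa using h0
      set f : Char := if c ≠ fill then (if c = '1' then '1' else '0') else fill with hf
      set a : Int := if c ≠ fill then ans + 1 else ans with ha
      have hstep : solStepA tl (pre ++ List.replicate (c :: rest).length fill, ans) (pre.length : Int)
          = ((pre ++ [f]) ++ List.replicate rest.length f, a) := by
        unfold solStepA
        have h1 : PySem.List.pyGetD (pre ++ List.replicate (c :: rest).length fill) (pre.length : Int) ' ' = fill := by
          rw [PySem.List.pyGetD_natCast]
          rw [List.getD_eq_getElem _ _ (by simp)]
          simp
        have h2 : PySem.List.pyGetD tl (pre.length : Int) ' ' = c := by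
          rw [PySem.List.pyGetD_natCast]
          rw [List.getD_eq_getElem _ _ hk]
          exact hc
        have hslice : PySem.List.slice (pre ++ List.replicate (c :: rest).length fill) none (some (pre.length : Int)) = pre := by
          rw [PySem.List.slice_to_natCast]
          simp
        have hcnt : ((tl.length : Int) - (pre.length : Int)).toNat = rest.length + 1 := by omega
        rw [h1, h2, hslice, hcnt]
        by_cases hcf : c = fill
        · simp [hcf, hf, ha, ← List.replicate_succ, List.append_assoc]
        · have hcf' : fill ≠ c := Ne.symm hcf
          by_cases h1c : c = '1'
          · subst h1c
            simp [hcf, hcf', hf, ha, List.replicate_succ, List.append_assoc]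
          · simp [hcf, hcf', h1c, hf, ha, List.replicate_succ, List.append_assoc]
      rw [hstep]
      have hB : solStepB (fill, ans) c = (f, a) := by
        unfold solStepB
        by_cases hcf : c = fill <;> simp [hcf, hf, ha]
      have hcast : ((pre ++ [f]).length : Int) = (pre.length : Int) + 1 := by
        simp
      have := ih (pre ++ [f]) f a
        (by
          have hdt : tl.drop (pre.length + 1) = rest := by
            rw [← List.tail_drop, hdrop]
            rfl
          have hl : (pre ++ [f]).length = pre.length + 1 := by
            simp
          rw [hl]
          exact hdt)
        (by simp only [List.length_append, List.length_cons, List.length_nil]; omega)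
      rw [hB, ← hcast]
      exact this

theorem solution_spec : Claim_equal_solution := by
  intro seq target _
  unfold Spec_solution solution solution_alt
  have h := loop_invariant target.toList target.toList [] '0' 0 (by simp) (by simp)
  simp only [List.length_nil, Nat.cast_zero, List.nil_append] at h
  rw [h]
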